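-- pv_equiv track=rewrite | github.com/DanielEbert/AOC2020 | 10/p2.py | paths_in_contiguous_ones
-- ===== SOURCE A (Python) =====
-- def paths_in_contiguous_ones(n_paths, cur, jolts) -> int:
--   stack = [0]
--   while stack:
--     ind = stack.pop()
--     if ind >= len(jolts)-1:
--       n_paths += 1
--     for i in range(1, 4):
--       if ind + i == len(jolts):
--         break
--       if jolts[ind + i] - jolts[ind] <= 3:
--         stack.append(ind + i)
--   return n_paths
-- ===== SOURCE B (Python) =====
-- def paths_in_contiguous_ones(n_paths, cur, jolts) -> int:
--   # Backward dynamic programming: dp[k] = number of admissible paths from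
--   # suffix position k to the last index; built right-to-left in one pass.
--   dp = []          # dp for the suffix already processed
--   suffix = []      # that suffix of jolts
--   for x in reversed(jolts):
--     if dp:
--       dp = [sum(c for y, c in zip(suffix[:3], dp) if y - x <= 3)] + dp
--     else:
--       dp = [1]
--     suffix = [x] + suffix
--   return n_paths + dp[0]
-- ===== Notes on version B (the rewrite author's own statement) =====
-- stated objective: faster
-- what changed: Replaces A's worklist DFS that enumerates every individual adapter path with a single right-to-left dynamic-programming pass that counts paths per position (dp[k] = paths from k to the end), so the count is computed without enumerating paths.
-- outside the precondition, e.g. on paths_in_contiguous_ones(0, 0, []): A raises IndexError, B raises IndexError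
import Mathlib
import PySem

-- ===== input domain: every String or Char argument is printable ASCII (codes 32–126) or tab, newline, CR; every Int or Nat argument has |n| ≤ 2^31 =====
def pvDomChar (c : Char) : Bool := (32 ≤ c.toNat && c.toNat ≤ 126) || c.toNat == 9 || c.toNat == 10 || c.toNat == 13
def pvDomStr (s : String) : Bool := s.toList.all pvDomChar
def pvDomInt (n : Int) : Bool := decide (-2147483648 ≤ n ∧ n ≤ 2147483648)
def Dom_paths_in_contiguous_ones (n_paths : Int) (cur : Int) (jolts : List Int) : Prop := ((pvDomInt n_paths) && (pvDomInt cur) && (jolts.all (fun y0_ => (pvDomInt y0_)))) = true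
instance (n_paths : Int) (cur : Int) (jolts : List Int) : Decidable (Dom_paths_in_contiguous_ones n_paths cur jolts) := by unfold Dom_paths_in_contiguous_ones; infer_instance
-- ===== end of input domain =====

-- B replaces A's exponential DFS path enumeration by a single right-to-left
-- dynamic-programming pass (dp[k] = number of paths from position k to the end).

-- ===== PORT A =====
-- A's inner for-loop: i runs over [1,2,3]; Python breaks when ind+i == len(jolts).
-- The '≥' below stops in ADDITION exactly where Python would raise an IndexError
-- (only possible when ind ≥ len, a state unreachable from the initial stack [0]):
-- a totality guard, not a change of algorithm.
def pushesA (jolts : List Int) (ind : Int) : List Int → List Int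
  | [] => []
  | i :: is =>
    if (jolts.length : Int) ≤ ind + i then []
    else if (PySem.List.pyGet? jolts (ind + i)).getD 0 - (PySem.List.pyGet? jolts ind).getD 0 ≤ 3 then
      (ind + i) :: pushesA jolts ind is
    else pushesA jolts ind is

-- termination measure for A's while-loop
def muA (jolts : List Int) (stack : List Int) : Nat :=
  (stack.map (fun e => 4 ^ (((jolts.length : Int) - e).toNat))).sum

lemma length_pushesA_le (jolts : List Int) (ind : Int) :
    ∀ is : List Int, (pushesA jolts ind is).length ≤ is.length := by
  intro is
  induction is with
  | nil => simp [pushesA]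
  | cons i is ih =>
    simp only [pushesA]
    split_ifs <;> simp <;> omega

lemma mem_pushesA (jolts : List Int) (ind : Int) :
    ∀ is : List Int, (∀ i ∈ is, 1 ≤ i) →
      ∀ p ∈ pushesA jolts ind is, ind < p ∧ p < (jolts.length : Int) := by
  intro is
  induction is with
  | nil => intro _ p hp; simp [pushesA] at hp
  | cons i is ih =>
    intro hpos p hp
    simp only [pushesA] at hp
    by_cases h1 : (jolts.length : Int) ≤ ind + i
    · rw [if_pos h1] at hp; simp at hp
    · rw [if_neg h1] at hp
      by_cases h2 : (PySem.List.pyGet? jolts (ind + i)).getD 0 - (PySem.List.pyGet? jolts ind).getD 0 ≤ 3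
      · rw [if_pos h2, List.mem_cons] at hp
        rcases hp with rfl | hp
        · exact ⟨by have := hpos i (by simp); omega, by omega⟩
        · exact ih (fun j hj => hpos j (by simp [hj])) p hp
      · rw [if_neg h2] at hp
        exact ih (fun j hj => hpos j (by simp [hj])) p hp

lemma mu_decrease (jolts : List Int) (ind : Int) (rest : List Int) :
    muA jolts ((pushesA jolts ind [1, 2, 3]).reverse ++ rest) < muA jolts (ind :: rest) := by
  have hsplit : muA jolts ((pushesA jolts ind [1, 2, 3]).reverse ++ rest)
      = ((pushesA jolts ind [1, 2, 3]).map (fun e => 4 ^ (((jolts.length : Int) - e).toNat))).sum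
        + muA jolts rest := by
    simp [muA, List.map_reverse, List.sum_reverse]
  have hcons : muA jolts (ind :: rest)
      = 4 ^ (((jolts.length : Int) - ind).toNat) + muA jolts rest := by
    simp [muA]
  rw [hsplit, hcons]
  by_cases hind : ind < (jolts.length : Int)
  · set t : Nat := (((jolts.length : Int) - ind)).toNat with ht
    have ht1 : 1 ≤ t := by omega
    have hbound : ∀ x ∈ (pushesA jolts ind [1, 2, 3]).map
        (fun e => 4 ^ (((jolts.length : Int) - e).toNat)), x ≤ 4 ^ (t - 1) := by
      intro x hx
      simp only [List.mem_map] at hx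
      obtain ⟨p, hp, rfl⟩ := hx
      have hb := mem_pushesA jolts ind [1, 2, 3] (by intro i hi; fin_cases hi <;> norm_num) p hp
      have : (((jolts.length : Int) - p)).toNat ≤ t - 1 := by omega
      exact Nat.pow_le_pow_right (by norm_num) this
    have hsum := List.sum_le_card_nsmul _ _ hbound
    have hlen : ((pushesA jolts ind [1, 2, 3]).map
        (fun e => 4 ^ (((jolts.length : Int) - e).toNat))).length ≤ 3 := by
      simpa using length_pushesA_le jolts ind [1, 2, 3]
    have h3 : ((pushesA jolts ind [1, 2, 3]).map
        (fun e => 4 ^ (((jolts.length : Int) - e).toNat))).sum ≤ 3 * 4 ^ (t - 1) := by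
      calc _ ≤ _ := hsum
        _ ≤ 3 * 4 ^ (t - 1) := by
          simp only [smul_eq_mul]
          exact Nat.mul_le_mul_right _ hlen
    have h4 : 3 * 4 ^ (t - 1) < 4 ^ t := by
      have : 4 ^ t = 4 * 4 ^ (t - 1) := by
        rw [← pow_succ']
        congr 1
        omega
      rw [this]
      have : 0 < 4 ^ (t - 1) := Nat.pow_pos (by norm_num)
      omega
    omega
  · have hnil : pushesA jolts ind [1, 2, 3] = [] := by
      simp only [pushesA]
      rw [if_pos (by omega)]
    rw [hnil]
    simp

-- A's while-loop over the explicit stack (Python pops/appends at the END of the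
-- list; the Lean list below is that stack REVERSED, so pop = head).
def pathsLoopA (jolts : List Int) (stack : List Int) (n_paths : Int) : Int :=
  match stack with
  | [] => n_paths
  | ind :: rest =>
    pathsLoopA jolts ((pushesA jolts ind [1, 2, 3]).reverse ++ rest)
      (if (jolts.length : Int) - 1 ≤ ind then n_paths + 1 else n_paths)
termination_by muA jolts stack
decreasing_by exact mu_decrease jolts ind rest

def paths_in_contiguous_ones (n_paths : Int) (cur : Int) (jolts : List Int) : Int :=
  pathsLoopA jolts [0] n_paths

-- ===== PORT B =====
-- sum(c for y, c in zip(suffix[:3], dp) if y - x <= 3)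
def seg3sum (x : Int) (ys ds : List Int) : Int :=
  ((ys.take 3).zip ds).foldl (fun s p => if p.1 - x ≤ 3 then s + p.2 else s) 0

-- B's loop over reversed(jolts) with state (dp, suffix)
def stepB (st : List Int × List Int) (x : Int) : List Int × List Int :=
  (if st.1.isEmpty then [1] else seg3sum x st.2 st.1 :: st.1, x :: st.2)

def paths_in_contiguous_ones_alt (n_paths : Int) (cur : Int) (jolts : List Int) : Int :=
  let st := jolts.reverse.foldl stepB ([], [])
  n_paths + st.1.headD 0    -- Python dp[0]; dp = [] (jolts = []) raises, excluded by Pre_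

-- ===== PRECONDITION & SPEC =====
-- Pre_ excludes only jolts = [], on which both A and B raise IndexError.
def Pre_paths_in_contiguous_ones (n_paths : Int) (cur : Int) (jolts : List Int) : Prop :=
  jolts ≠ []
instance (n_paths : Int) (cur : Int) (jolts : List Int) : Decidable (Pre_paths_in_contiguous_ones n_paths cur jolts) := by unfold Pre_paths_in_contiguous_ones; infer_instance

def pvWitness_paths_in_contiguous_ones : Int × Int × List Int := (0, 0, [1, 2, 3, 6])

def Spec_paths_in_contiguous_ones (n_paths : Int) (cur : Int) (jolts : List Int) (out : Int) : Prop := out = paths_in_contiguous_ones_alt n_paths cur jolts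
instance (n_paths : Int) (cur : Int) (jolts : List Int) (out : Int) : Decidable (Spec_paths_in_contiguous_ones n_paths cur jolts out) := by unfold Spec_paths_in_contiguous_ones; infer_instance

-- ===== CLAIM (what is proved, stated in full; the proofs are below) =====
def Claim_equal_paths_in_contiguous_ones : Prop := ∀ (n_paths : Int) (cur : Int) (jolts : List Int), Dom_paths_in_contiguous_ones n_paths cur jolts → Pre_paths_in_contiguous_ones n_paths cur jolts → Spec_paths_in_contiguous_ones n_paths cur jolts (paths_in_contiguous_ones n_paths cur jolts)

-- ===== LEMMAS AND PROOFS =====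

-- the recursive (foldr) view of B's dp list
def dpB : List Int → List Int
  | [] => []
  | x :: rest =>
    match dpB rest with
    | [] => [1]
    | d => seg3sum x rest d :: d

lemma dpB_nil_iff (l : List Int) : dpB l = [] ↔ l = [] := by
  cases l with
  | nil => simp [dpB]
  | cons x rest =>
    simp only [dpB]
    cases dpB rest <;> simp

lemma dpB_cons (x : Int) (l : List Int) :
    dpB (x :: l) = (if l = [] then 1 else seg3sum x l (dpB l)) :: dpB l := by
  simp only [dpB]
  cases h : dpB l with
  | nil => rw [if_pos ((dpB_nil_iff l).mp h)]
  | cons d ds =>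
    rw [if_neg]
    intro hl
    rw [hl] at h
    simp [dpB] at h

lemma foldlB_eq (jolts : List Int) :
    jolts.reverse.foldl stepB ([], []) = (dpB jolts, jolts) := by
  induction jolts with
  | nil => simp [dpB]
  | cons x l ih =>
    rw [List.reverse_cons, List.foldl_append, ih]
    simp only [List.foldl_cons, List.foldl_nil, stepB, dpB_cons]
    cases h : dpB l with
    | nil => simp [(dpB_nil_iff l).mp h]
    | cons d ds =>
      have : l ≠ [] := by
        intro hl; rw [hl] at h; simp [dpB] at h
      simp [h, this]

-- dp value at position k = head of dpB of the k-th suffix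
def Pv (jolts : List Int) (k : Nat) : Int := (dpB (jolts.drop k)).headD 0

lemma drop_eq_getElem_cons (l : List Int) (k : Nat) (hk : k < l.length) :
    l.drop k = l[k] :: l.drop (k + 1) := by
  exact (List.getElem_cons_drop (by omega)).symm

-- one stack step of A equals the dp recurrence
lemma dpB_drop_cons (jolts : List Int) (m : Nat) (hm : m < jolts.length) :
    dpB (jolts.drop m) = Pv jolts m :: dpB (jolts.drop (m + 1)) := by
  have h := drop_eq_getElem_cons jolts m hm
  unfold Pv
  rw [h, dpB_cons]
  simp

lemma Pv_eq (jolts : List Int) (m : Nat) (hm : m < jolts.length) :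
    Pv jolts m = if jolts.drop (m + 1) = [] then 1
      else seg3sum jolts[m] (jolts.drop (m + 1)) (dpB (jolts.drop (m + 1))) := by
  unfold Pv
  rw [drop_eq_getElem_cons jolts m hm, dpB_cons]
  simp

lemma pyG (jolts : List Int) (m : Nat) (hm : m < jolts.length) :
    (PySem.List.pyGet? jolts (m : Int)).getD 0 = jolts[m] := by
  rw [PySem.List.pyGet?_natCast]
  simp [List.getElem?_eq_getElem hm]

lemma step_eq (jolts : List Int) (k : Nat) (hk : k < jolts.length) :
    Pv jolts k = (if (jolts.length : Int) - 1 ≤ (k : Int) then 1 else 0)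
      + ((pushesA jolts (k : Int) [1, 2, 3]).map (fun e => Pv jolts e.toNat)).sum := by
  have hdropk := drop_eq_getElem_cons jolts k hk
  have hlen1 : (jolts.drop (k + 1)).length = jolts.length - (k + 1) := by simp
  have g0 : (PySem.List.pyGet? jolts ((k : Int))).getD 0 = jolts[k] := pyG jolts k hk
  have g0' : jolts[k]?.getD 0 = jolts[k] := by simp [List.getElem?_eq_getElem hk]
  cases hd1 : jolts.drop (k + 1) with
  | nil =>
    have hlen : jolts.length = k + 1 := by rw [hd1] at hlen1; simp at hlen1; omega
    have hpush : pushesA jolts (k : Int) [1, 2, 3] = [] := by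
      simp only [pushesA]
      rw [if_pos (by rw [hlen]; push_cast; omega)]
    have hPv : Pv jolts k = 1 := by unfold Pv; rw [hdropk, hd1]; simp [dpB]
    rw [hpush, hPv, if_pos (by rw [hlen]; push_cast; omega)]
    simp
  | cons a t2 =>
    have hk1 : k + 1 < jolts.length := by rw [hd1] at hlen1; simp at hlen1; omega
    have h2 := drop_eq_getElem_cons jolts (k + 1) hk1
    simp only [show k + 1 + 1 = k + 2 from by omega] at h2
    rw [hd1] at h2
    injection h2 with ha hd2
    have g1 : (PySem.List.pyGet? jolts ((k : Int) + 1)).getD 0 = a := by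
      rw [show ((k : Int) + 1) = (((k + 1 : Nat) : Int)) from by push_cast; ring,
        pyG jolts (k + 1) hk1, ← ha]
    have hD1 : dpB (jolts.drop (k + 1)) = Pv jolts (k + 1) :: dpB (jolts.drop (k + 2)) := by
      simpa [show k + 1 + 1 = k + 2 from by omega] using dpB_drop_cons jolts (k + 1) hk1
    have hL : Pv jolts k = seg3sum jolts[k] (jolts.drop (k + 1)) (dpB (jolts.drop (k + 1))) := by
      rw [Pv_eq jolts k hk, if_neg (by rw [hd1]; simp)]
    have hcond : ¬ ((jolts.length : Int) - 1 ≤ (k : Int)) := by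
      have : k + 1 < jolts.length := hk1
      push_cast
      omega
    have hg1 : ¬ ((jolts.length : Int) ≤ (k : Int) + 1) := by push_cast; omega
    have tn1 : ((k : Int) + 1).toNat = k + 1 := by omega
    rw [hL, if_neg hcond]
    cases t2 with
    | nil =>
      -- jolts.drop (k+1) = [a] : len = k + 2
      have hlen : jolts.length = k + 2 := by rw [hd1] at hlen1; simp at hlen1; omega
      have hg2p : ((jolts.length : Int) ≤ (k : Int) + 2) := by push_cast; omega
      rw [hD1, hd1]
      simp [seg3sum, pushesA, g0, g0', g1, hg1, hg2p, tn1]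
      split_ifs <;> simp [tn1] <;> omega
    | cons b t3 =>
      have hk2 : k + 2 < jolts.length := by rw [hd1] at hlen1; simp at hlen1; omega
      have h3 := drop_eq_getElem_cons jolts (k + 2) hk2
      simp only [show k + 2 + 1 = k + 3 from by omega] at h3
      rw [← hd2] at h3
      injection h3 with hb hd3
      have g2 : (PySem.List.pyGet? jolts ((k : Int) + 2)).getD 0 = b := by
        rw [show ((k : Int) + 2) = (((k + 2 : Nat) : Int)) from by push_cast; ring,
          pyG jolts (k + 2) hk2, ← hb]
      have hD2 : dpB (jolts.drop (k + 2)) = Pv jolts (k + 2) :: dpB (jolts.drop (k + 3)) := by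
        simpa [show k + 2 + 1 = k + 3 from by omega] using dpB_drop_cons jolts (k + 2) hk2
      have hg2 : ¬ ((jolts.length : Int) ≤ (k : Int) + 2) := by push_cast; omega
      have tn2 : ((k : Int) + 2).toNat = k + 2 := by omega
      cases t3 with
      | nil =>
        -- jolts.drop (k+1) = [a, b] : len = k + 3
        have hlen : jolts.length = k + 3 := by rw [hd1] at hlen1; simp at hlen1; omega
        have hg3p : ((jolts.length : Int) ≤ (k : Int) + 3) := by push_cast; omega
        rw [hD1, hD2, hd1]
        simp [seg3sum, pushesA, g0, g0', g1, g2, hg1, hg2, hg3p, tn1, tn2]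
        split_ifs <;> simp [tn1, tn2] <;> omega
      | cons c t4 =>
        -- jolts.drop (k+1) = a :: b :: c :: t4 : k + 4 ≤ len
        have hk3 : k + 3 < jolts.length := by rw [hd1] at hlen1; simp at hlen1; omega
        have h4 := drop_eq_getElem_cons jolts (k + 3) hk3
        simp only [show k + 3 + 1 = k + 4 from by omega] at h4
        rw [← hd3] at h4
        injection h4 with hc hd4
        have g3 : (PySem.List.pyGet? jolts ((k : Int) + 3)).getD 0 = c := by
          rw [show ((k : Int) + 3) = (((k + 3 : Nat) : Int)) from by push_cast; ring,
            pyG jolts (k + 3) hk3, ← hc]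
        have hD3 : dpB (jolts.drop (k + 3)) = Pv jolts (k + 3) :: dpB (jolts.drop (k + 4)) := by
          simpa [show k + 3 + 1 = k + 4 from by omega] using dpB_drop_cons jolts (k + 3) hk3
        have hg3 : ¬ ((jolts.length : Int) ≤ (k : Int) + 3) := by push_cast; omega
        have tn3 : ((k : Int) + 3).toNat = k + 3 := by omega
        rw [hD1, hD2, hD3, hd1]
        simp [seg3sum, pushesA, g0, g0', g1, g2, g3, hg1, hg2, hg3, tn1, tn2, tn3]
        split_ifs <;> simp [tn1, tn2, tn3] <;> omega

lemma pushes_inv (jolts : List Int) (ind : Int) (h0 : 0 ≤ ind) :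
    ∀ p ∈ pushesA jolts ind [1, 2, 3], 0 ≤ p ∧ p < (jolts.length : Int) := by
  intro p hp
  have hb := mem_pushesA jolts ind [1, 2, 3] (by intro i hi; fin_cases hi <;> norm_num) p hp
  omega

lemma loopA_eq (jolts : List Int) : ∀ (m : Nat) (stack : List Int) (n_paths : Int),
    muA jolts stack = m →
    (∀ e ∈ stack, 0 ≤ e ∧ e < (jolts.length : Int)) →
    pathsLoopA jolts stack n_paths
      = n_paths + (stack.map (fun e => Pv jolts e.toNat)).sum := by
  intro m
  induction m using Nat.strong_induction_on with
  | _ m ih =>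
    intro stack n_paths hm hinv
    match stack with
    | [] => simp [pathsLoopA]
    | ind :: rest =>
      rw [pathsLoopA]
      have hind := hinv ind (by simp)
      have hinv' : ∀ e ∈ (pushesA jolts ind [1, 2, 3]).reverse ++ rest,
          0 ≤ e ∧ e < (jolts.length : Int) := by
        intro e he
        rcases List.mem_append.mp he with he | he
        · exact pushes_inv jolts ind hind.1 e (List.mem_reverse.mp he)
        · exact hinv e (by simp [he])
      have hlt := mu_decrease jolts ind rest
      rw [ih _ (by omega) _ _ rfl hinv']
      have hk : ind = ((ind.toNat : Nat) : Int) := by omega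
      have hkl : ind.toNat < jolts.length := by omega
      have hstep := step_eq jolts ind.toNat hkl
      rw [← hk] at hstep
      simp only [List.map_append, List.sum_append, List.map_reverse, List.sum_reverse,
        List.map_cons, List.sum_cons]
      split_ifs with hge
      · rw [if_pos hge] at hstep
        omega
      · rw [if_neg hge] at hstep
        omega

-- ===== VERDICT (by name: the statement is the Claim_ definition above) =====
theorem paths_in_contiguous_ones_spec : Claim_equal_paths_in_contiguous_ones := by
  intro n_paths cur jolts _ hpre
  unfold Spec_paths_in_contiguous_ones paths_in_contiguous_ones paths_in_contiguous_ones_alt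
  rw [foldlB_eq]
  have hlen : 0 < jolts.length := List.length_pos_of_ne_nil hpre
  rw [loopA_eq jolts (muA jolts [0]) [0] n_paths rfl
    (by intro e he; simp at he; subst he; constructor <;> [omega; exact_mod_cast hlen])]
  simp [Pv]
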